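-- pv_equiv track=rewrite | github.com/jameshung2015/vita-model-researcher | agents-toolchain/agentic/orchestrator.py | normalize_indicators
-- ===== SOURCE A (Python) =====
-- SUPPORTED = [
--     'win_rate',
--     'elo_rating',
--     'latency_p99',
--     'throughput_rps',
--     'toxicity',
--     'accuracy_f1',
-- ]
--
-- ALIASES = {
--     'wr': 'win_rate',
--     'elo': 'elo_rating',
--     'toxicity_rate': 'toxicity',
--     'f1': 'accuracy_f1',
-- }
--
-- def normalize_indicators(indicators: list[str]) -> list[str]:
--     out = []
--     for k in indicators:
--         k2 = ALIASES.get(k.strip().lower(), k.strip().lower())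
--         if k2 not in SUPPORTED:
--             # skip unknown indicators silently to keep runs resilient
--             continue
--         out.append(k2)
--     # preserve order and dedupe
--     seen = set()
--     res = []
--     for k in out:
--         if k not in seen:
--             res.append(k)
--             seen.add(k)
--     return res
-- ===== SOURCE B (Python) =====
-- SUPPORTED = [
--     'win_rate',
--     'elo_rating',
--     'latency_p99',
--     'throughput_rps',
--     'toxicity',
--     'accuracy_f1',
-- ]
--
-- ALIASES = {
--     'wr': 'win_rate',
--     'elo': 'elo_rating',
--     'toxicity_rate': 'toxicity',
--     'f1': 'accuracy_f1',
-- }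
--
-- def normalize_indicators(indicators: list[str]) -> list[str]:
--     # back-to-front: walk the list in reverse with NO seen-set; prepend each
--     # supported canonical name and drop any occurrence already accumulated,
--     # so the first (leftmost) occurrence ends up deciding the position.
--     res = []
--     for k in reversed(indicators):
--         k2 = k.strip().lower()
--         k2 = ALIASES.get(k2, k2)
--         if k2 in SUPPORTED:
--             res = [k2] + [x for x in res if x != k2]
--     return res
-- ===== Notes on version B (the rewrite author's own statement) =====
-- stated objective: alternative
-- what changed: Replaces A's forward filter pass plus seen-set dedupe pass with a single backward traversal that keeps no seen-set: each supported name is prepended and any already-accumulated duplicate is filtered out of the (at most 6-element) result, so the leftmost occurrence wins by construction.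
import Mathlib
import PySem

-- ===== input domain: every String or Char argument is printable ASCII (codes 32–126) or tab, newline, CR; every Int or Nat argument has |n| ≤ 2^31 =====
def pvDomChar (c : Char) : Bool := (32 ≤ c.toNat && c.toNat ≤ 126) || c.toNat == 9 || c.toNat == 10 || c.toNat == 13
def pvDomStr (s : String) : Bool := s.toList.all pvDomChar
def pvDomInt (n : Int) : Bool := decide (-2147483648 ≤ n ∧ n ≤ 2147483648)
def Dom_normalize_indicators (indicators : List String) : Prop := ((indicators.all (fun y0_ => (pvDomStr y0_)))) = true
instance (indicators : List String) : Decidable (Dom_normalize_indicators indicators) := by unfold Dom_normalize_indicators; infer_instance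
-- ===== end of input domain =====

-- B replaces A's forward filter pass + seen-set dedupe pass by one backward traversal with no
-- seen-set: each supported name is prepended and already-accumulated duplicates are filtered out,
-- so the leftmost occurrence wins (objective: alternative).

-- ===== PORT A =====
def pvSupported : List String :=
  ["win_rate", "elo_rating", "latency_p99", "throughput_rps", "toxicity", "accuracy_f1"]

def pvAliases : PySem.Dict String String :=
  PySem.Dict.ofList [("wr", "win_rate"), ("elo", "elo_rating"), ("toxicity_rate", "toxicity"), ("f1", "accuracy_f1")]

-- k2 = ALIASES.get(k.strip().lower(), k.strip().lower())
def pvNorm (k : String) : String :=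
  PySem.Dict.getD pvAliases (PySem.Str.lower (PySem.Str.strip k)) (PySem.Str.lower (PySem.Str.strip k))

def normalize_indicators (indicators : List String) : List String :=
  -- first loop: out
  let out := indicators.foldl (fun out k =>
    let k2 := pvNorm k
    if pvSupported.contains k2 then out ++ [k2] else out) []
  -- second loop: dedupe with seen/res
  let p := out.foldl (fun (p : List String × PySem.Set String) k =>
    if PySem.Set.contains p.2 k then p else (p.1 ++ [k], PySem.Set.add p.2 k)) ([], PySem.Set.empty)
  p.1

-- ===== PORT B =====
def normalize_indicators_alt (indicators : List String) : List String :=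
  indicators.reverse.foldl (fun (res : List String) k =>
    let k2 := pvNorm k
    if pvSupported.contains k2 then k2 :: res.filter (fun x => x != k2) else res) []

-- ===== PRECONDITION & SPEC =====
def Spec_normalize_indicators (indicators : List String) (out : List String) : Prop := out = normalize_indicators_alt indicators
instance (indicators : List String) (out : List String) : Decidable (Spec_normalize_indicators indicators out) := by unfold Spec_normalize_indicators; infer_instance

-- ===== CLAIM (what is proved, stated in full; the proofs are below) =====
def Claim_equal_normalize_indicators : Prop := ∀ (indicators : List String), Dom_normalize_indicators indicators → Spec_normalize_indicators indicators (normalize_indicators indicators)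

-- ===== LEMMAS AND PROOFS =====

-- named copies of the loop bodies (definitionally equal to the lambdas in the ports)
def pvStepA (out : List String) (k : String) : List String :=
  let k2 := pvNorm k
  if pvSupported.contains k2 then out ++ [k2] else out

def pvStepD (p : List String × PySem.Set String) (k : String) : List String × PySem.Set String :=
  if PySem.Set.contains p.2 k then p else (p.1 ++ [k], PySem.Set.add p.2 k)

def pvStepB (res : List String) (k : String) : List String :=
  let k2 := pvNorm k
  if pvSupported.contains k2 then k2 :: res.filter (fun x => x != k2) else res

def pvF (k : String) : Option String :=
  if pvSupported.contains (pvNorm k) then some (pvNorm k) else none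

-- first-occurrence dedup, recursively
def pvDed : List String → List String
  | [] => []
  | x :: t => x :: (pvDed t).filter (fun y => y != x)

-- A's first loop equals a filterMap through pvNorm
lemma firstLoop_eq (l : List String) (acc : List String) :
    l.foldl pvStepA acc = acc ++ l.filterMap pvF := by
  induction l generalizing acc with
  | nil => simp
  | cons k l ih =>
    cases hs : pvSupported.contains (pvNorm k)
    · have hf : pvF k = none := by simp only [pvF]; simp_all
      have ha : pvStepA acc k = acc := by simp only [pvStepA]; simp_all
      rw [List.foldl_cons, List.filterMap_cons, hf, ha, ih]
    · have hf : pvF k = some (pvNorm k) := by simp only [pvF]; simp_all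
      have ha : pvStepA acc k = acc ++ [pvNorm k] := by simp only [pvStepA]; simp_all
      rw [List.foldl_cons, List.filterMap_cons, hf, ha, ih]
      simp

-- pvDed commutes with filtering
lemma ded_filter (p : String → Bool) (l : List String) :
    pvDed (l.filter p) = (pvDed l).filter p := by
  induction l with
  | nil => rfl
  | cons x t ih =>
    cases hp : p x with
    | true =>
      rw [show pvDed (x :: t) = x :: (pvDed t).filter (fun y => y != x) from rfl,
          List.filter_cons_of_pos hp, List.filter_cons_of_pos hp]
      rw [show pvDed (x :: t.filter p) = x :: (pvDed (t.filter p)).filter (fun y => y != x) from rfl,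
          ih, List.filter_filter, List.filter_filter]
      congr 1
      congr 1
      funext a
      exact Bool.and_comm ..
    | false =>
      rw [show pvDed (x :: t) = x :: (pvDed t).filter (fun y => y != x) from rfl,
          List.filter_cons_of_neg (by simp [hp]), List.filter_cons_of_neg (by simp [hp]),
          ih, List.filter_filter]
      congr 1
      funext a
      by_cases ha : a = x
      · subst ha; simp [hp]
      · simp [ha]

-- A's dedupe loop equals pvDed (invariant over the seen-set)
lemma dedupLoop_eq (xs : List String) (acc : List String) (s : PySem.Set String) :
    (xs.foldl pvStepD (acc, s)).1 = acc ++ pvDed (xs.filter (fun x => !(PySem.Set.contains s x))) := by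
  induction xs generalizing acc s with
  | nil => simp [pvDed]
  | cons x t ih =>
    by_cases hm : x ∈ s
    · have hd : pvStepD (acc, s) x = (acc, s) := by simp [pvStepD, hm]
      rw [List.foldl_cons, hd, ih,
          List.filter_cons_of_neg (by simp [hm])]
    · have hd : pvStepD (acc, s) x = (acc ++ [x], PySem.Set.add s x) := by simp [pvStepD, hm]
      rw [List.foldl_cons, hd, ih]
      have hfilter : t.filter (fun y => !(PySem.Set.contains (PySem.Set.add s x) y))
          = (t.filter (fun y => !(PySem.Set.contains s y))).filter (fun y => y != x) := by
        rw [List.filter_filter]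
        congr 1
        funext y
        by_cases hy : y = x
        · subst hy; simp [hm]
        · by_cases hys : y ∈ s <;> simp [PySem.Set.mem_add, hy, hys]
      rw [hfilter, List.filter_cons_of_pos (by simp [hm]),
          show ∀ z zs, pvDed (z :: zs) = z :: (pvDed zs).filter (fun y => y != z) from fun _ _ => rfl]
      simp
      rw [← ded_filter, List.filter_filter]


-- B equals pvDed of the same filterMap
lemma B_eq (l : List String) :
    l.reverse.foldl pvStepB [] = pvDed (l.filterMap pvF) := by
  rw [List.foldl_reverse]
  induction l with
  | nil => rfl
  | cons k t ih =>
    cases hs : pvSupported.contains (pvNorm k)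
    · have hf : pvF k = none := by simp only [pvF]; simp_all
      have hb : ∀ res, pvStepB res k = res := by intro res; simp only [pvStepB]; simp_all
      simp only [List.foldr_cons, List.filterMap_cons, hf, hb, ih]
    · have hf : pvF k = some (pvNorm k) := by simp only [pvF]; simp_all
      have hb : ∀ res, pvStepB res k = pvNorm k :: res.filter (fun x => x != pvNorm k) := by
        intro res; simp only [pvStepB]; simp_all
      simp only [List.foldr_cons, List.filterMap_cons, hf, hb, ih, pvDed]

theorem normalize_indicators_spec : Claim_equal_normalize_indicators := by
  intro indicators _
  show normalize_indicators indicators = normalize_indicators_alt indicators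
  unfold normalize_indicators normalize_indicators_alt
  rw [show (fun (out : List String) (k : String) =>
      let k2 := pvNorm k
      if pvSupported.contains k2 then out ++ [k2] else out) = pvStepA from rfl]
  rw [show (fun (p : List String × PySem.Set String) (k : String) =>
      if PySem.Set.contains p.2 k then p else (p.1 ++ [k], PySem.Set.add p.2 k)) = pvStepD from rfl]
  rw [show (fun (res : List String) (k : String) =>
      let k2 := pvNorm k
      if pvSupported.contains k2 then k2 :: res.filter (fun x => x != k2) else res) = pvStepB from rfl]
  rw [firstLoop_eq, dedupLoop_eq, B_eq]
  simp [PySem.Set.empty]
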